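-- pv_equiv track=rewrite | github.com/blind-submission01/Code-for-anonymous-submission | 02_data_distillation/06_refine_rejected.py | build_remove_add_from_diff
-- ===== SOURCE A (Python) =====
-- from typing import Any, Dict, List, Tuple, Optional
--
-- def split_diff_blocks(diff_text: str) -> List[List[str]]:
--     """
--     将原生 git-diff 按块切分：
--     - 每个块从以 "diff " 开头的行开始，到下一个 "diff " 行之前（含起始行）。
--     - 如果最前面没有 "diff " 行，会把前置行并入第一块。
--     """
--     if not diff_text:
--         return []
--     lines = diff_text.splitlines()
--     blocks: List[List[str]] = []
--     current: List[str] = []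
--     for line in lines:
--         if line.startswith("diff "):
--             if current:
--                 blocks.append(current)
--             current = [line]
--         else:
--             if current:
--                 current.append(line)
--             else:
--                 current = [line]
--     if current:
--         blocks.append(current)
--     return blocks
--
-- def _build_remove_add_from_block(block_text: str) -> Tuple[str, str]:
--     """
--     从一个 diff block 中构建：
--     - diff_remove: file_path + 所有 '-' 和 ' ' 行
--     - diff_add:    file_path + 所有 '+' 和 ' ' 行
--     若无有效 file_path 或无修改，返回 ("", "")
--     """
--     lines = block_text.splitlines()
--     file_path: Optional[str] = None
--     remove_lines: List[str] = []
--     add_lines: List[str] = []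
--
--     for line in lines:
--         if line.startswith("+++ b/"):
--             file_path = line[6:].strip()
--         elif line.startswith("--- a/"):
--             file_path = line[6:].strip()
--         elif line.startswith("-") and not line.startswith("---"):
--             remove_lines.append(line)
--         elif line.startswith("+") and not line.startswith("+++"):
--             add_lines.append(line)
--         elif line.startswith(" "):
--             # 上下文同时给两边
--             # remove_lines.append(line)
--             # add_lines.append(line)
--             continue
--         else:
--             # 其他前缀忽略
--             continue
--
--     if not file_path:
--         return "", ""
--     if not remove_lines and not add_lines:
--         return "", ""
--
--     diff_remove = file_path + "\n" + "\n".join(remove_lines) if remove_lines else ""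
--     diff_add = file_path + "\n" + "\n".join(add_lines) if add_lines else ""
--     return diff_remove, diff_add
--
-- def build_remove_add_from_diff(diff_text: str) -> Tuple[str, str]:
--     """
--     对整个 unified diff：
--     - 先按 block 切分
--     - 每个 block 提取 diff_remove/diff_add
--     - 用空行拼接所有 block 的结果
--     """
--     if not diff_text:
--         return "", ""
--
--     blocks = split_diff_blocks(diff_text)
--     remove_chunks: List[str] = []
--     add_chunks: List[str] = []
--
--     for blk in blocks:
--         blk_text = "\n".join(blk)
--         r, a = _build_remove_add_from_block(blk_text)
--         if r:
--             remove_chunks.append(r)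
--         if a:
--             add_chunks.append(a)
--
--     diff_remove = "\n\n".join(remove_chunks) if remove_chunks else ""
--     diff_add = "\n\n".join(add_chunks) if add_chunks else ""
--     return diff_remove, diff_add
-- ===== SOURCE B (Python) =====
-- from typing import Tuple
--
--
-- def _flush(file_path, rem, add, remove_chunks, add_chunks):
--     """Append the finished block's remove/add chunks (if any) to the running lists."""
--     if file_path:
--         if rem:
--             remove_chunks.append(file_path + "\n" + "\n".join(rem))
--         if add:
--             add_chunks.append(file_path + "\n" + "\n".join(add))
--
--
-- def build_remove_add_from_diff(diff_text: str) -> Tuple[str, str]: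
--     if not diff_text:
--         return "", ""
--     remove_chunks, add_chunks = [], []
--     file_path, rem, add = None, [], []
--     for line in diff_text.splitlines():
--         if line.startswith("diff "):
--             _flush(file_path, rem, add, remove_chunks, add_chunks)
--             file_path, rem, add = None, [], []
--         elif line.startswith("+++ b/") or line.startswith("--- a/"):
--             file_path = line[6:].strip()
--         elif line.startswith("-") and not line.startswith("---"):
--             rem.append(line)
--         elif line.startswith("+") and not line.startswith("+++"):
--             add.append(line)
--     _flush(file_path, rem, add, remove_chunks, add_chunks)
--     return "\n\n".join(remove_chunks), "\n\n".join(add_chunks)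
-- ===== Notes on version B (the rewrite author's own statement) =====
-- stated objective: simpler
-- what changed: Replaced A's split-into-blocks, join, re-splitlines and per-block re-parse pipeline with a single pass over the split lines that keeps (file_path, rem, add) for the current block and flushes that block's remove/add chunks at each block-header boundary and once after the loop.
import Mathlib
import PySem

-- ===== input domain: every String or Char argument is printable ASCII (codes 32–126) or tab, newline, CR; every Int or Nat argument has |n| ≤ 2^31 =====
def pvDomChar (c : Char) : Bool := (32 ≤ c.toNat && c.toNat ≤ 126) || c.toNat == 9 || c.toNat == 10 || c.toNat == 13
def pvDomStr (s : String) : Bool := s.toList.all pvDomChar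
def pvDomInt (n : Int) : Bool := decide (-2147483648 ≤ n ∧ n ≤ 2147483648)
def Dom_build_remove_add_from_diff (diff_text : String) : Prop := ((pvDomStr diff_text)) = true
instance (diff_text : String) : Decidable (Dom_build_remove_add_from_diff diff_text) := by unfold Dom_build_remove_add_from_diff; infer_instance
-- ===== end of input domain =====

-- B replaces A's split-into-blocks / join / re-splitlines / per-block-reparse pipeline with a single
-- pass over the lines, flushing the current block's chunks at each "diff " boundary (objective: simpler).

-- ===== PORT A =====
-- step of the loop in split_diff_blocks
def pvSplitStepA (st : List (List String) × List String) (line : String) : List (List String) × List String :=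
  if PySem.Str.startswith line "diff " then
    (if st.2.isEmpty then st.1 else st.1 ++ [st.2], [line])
  else
    if st.2.isEmpty then (st.1, [line]) else (st.1, st.2 ++ [line])

def split_diff_blocks (diff_text : String) : List (List String) :=
  if diff_text = "" then []
  else
    let lines := PySem.Str.splitlines diff_text
    let r := lines.foldl pvSplitStepA ([], [])
    if r.2.isEmpty then r.1 else r.1 ++ [r.2]

-- step of the loop in _build_remove_add_from_block (state: file_path, remove_lines, add_lines)
def pvBlockStepA (st : Option String × List String × List String) (line : String) :
    Option String × List String × List String :=
  if PySem.Str.startswith line "+++ b/" then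
    (some (PySem.Str.strip (PySem.Str.slice line (some 6) none)), st.2.1, st.2.2)
  else if PySem.Str.startswith line "--- a/" then
    (some (PySem.Str.strip (PySem.Str.slice line (some 6) none)), st.2.1, st.2.2)
  else if PySem.Str.startswith line "-" && !PySem.Str.startswith line "---" then
    (st.1, st.2.1 ++ [line], st.2.2)
  else if PySem.Str.startswith line "+" && !PySem.Str.startswith line "+++" then
    (st.1, st.2.1, st.2.2 ++ [line])
  else st

def pvBuildBlockA (block_text : String) : String × String :=
  let lines := PySem.Str.splitlines block_text
  let st := lines.foldl pvBlockStepA (none, [], [])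
  match st.1 with
  | none => ("", "")
  | some fp =>
    if fp = "" then ("", "")
    else if st.2.1.isEmpty && st.2.2.isEmpty then ("", "")
    else (if st.2.1.isEmpty then "" else fp ++ "\n" ++ PySem.Str.join "\n" st.2.1,
          if st.2.2.isEmpty then "" else fp ++ "\n" ++ PySem.Str.join "\n" st.2.2)

-- step of the loop over blocks in build_remove_add_from_diff
def pvChunkStepA (st : List String × List String) (blk : List String) : List String × List String :=
  let ra := pvBuildBlockA (PySem.Str.join "\n" blk)
  (if ra.1 = "" then st.1 else st.1 ++ [ra.1], if ra.2 = "" then st.2 else st.2 ++ [ra.2])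

def build_remove_add_from_diff (diff_text : String) : String × String :=
  if diff_text = "" then ("", "")
  else
    let blocks := split_diff_blocks diff_text
    let r := blocks.foldl pvChunkStepA ([], [])
    (if r.1.isEmpty then "" else PySem.Str.join "\n\n" r.1,
     if r.2.isEmpty then "" else PySem.Str.join "\n\n" r.2)

-- ===== PORT B =====
-- _flush in Source B (returns the updated chunk lists)
def pvFlushB (fp? : Option String) (rem add rc ac : List String) : List String × List String :=
  match fp? with
  | none => (rc, ac)
  | some fp =>
    if fp = "" then (rc, ac)
    else (if rem.isEmpty then rc else rc ++ [fp ++ "\n" ++ PySem.Str.join "\n" rem],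
          if add.isEmpty then ac else ac ++ [fp ++ "\n" ++ PySem.Str.join "\n" add])

-- body of the single loop in Source B (state: (remove_chunks, add_chunks), file_path, rem, add)
def pvStepB (st : (List String × List String) × Option String × List String × List String)
    (line : String) : (List String × List String) × Option String × List String × List String :=
  if PySem.Str.startswith line "diff " then
    (pvFlushB st.2.1 st.2.2.1 st.2.2.2 st.1.1 st.1.2, none, [], [])
  else if PySem.Str.startswith line "+++ b/" || PySem.Str.startswith line "--- a/" then
    (st.1, some (PySem.Str.strip (PySem.Str.slice line (some 6) none)), st.2.2.1, st.2.2.2)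
  else if PySem.Str.startswith line "-" && !PySem.Str.startswith line "---" then
    (st.1, st.2.1, st.2.2.1 ++ [line], st.2.2.2)
  else if PySem.Str.startswith line "+" && !PySem.Str.startswith line "+++" then
    (st.1, st.2.1, st.2.2.1, st.2.2.2 ++ [line])
  else st

def build_remove_add_from_diff_alt (diff_text : String) : String × String :=
  if diff_text = "" then ("", "")
  else
    let st := (PySem.Str.splitlines diff_text).foldl pvStepB (([], []), none, [], [])
    let r := pvFlushB st.2.1 st.2.2.1 st.2.2.2 st.1.1 st.1.2
    (PySem.Str.join "\n\n" r.1, PySem.Str.join "\n\n" r.2)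

-- ===== PRECONDITION & SPEC =====
def Spec_build_remove_add_from_diff (diff_text : String) (out : String × String) : Prop := out = build_remove_add_from_diff_alt diff_text
instance (diff_text : String) (out : String × String) : Decidable (Spec_build_remove_add_from_diff diff_text out) := by unfold Spec_build_remove_add_from_diff; infer_instance

-- ===== CLAIM (what is proved, stated in full; the proofs are below) =====
def Claim_equal_build_remove_add_from_diff : Prop := ∀ (diff_text : String), Dom_build_remove_add_from_diff diff_text → Spec_build_remove_add_from_diff diff_text (build_remove_add_from_diff diff_text)

-- ===== LEMMAS AND PROOFS =====

-- the line-break test baked into PySem.Chars.splitlines (definitionally equal to its `have`)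
def pvIsB (c : Char) : Bool :=
  have n := c.toNat
  decide (n = 10) || decide (n = 13) || decide (n = 11) || decide (n = 12) || decide (n = 28) || decide (n = 29) ||
          decide (n = 30) ||
        decide (n = 133) ||
      decide (n = 8232) ||
    decide (n = 8233)

theorem pv_splitlines_eq (s : List Char) :
    PySem.Chars.splitlines s = PySem.Chars.splitlines.go pvIsB s [] [] := rfl

theorem pv_go_nil (isB : Char → Bool) (cur : List Char) (acc : List (List Char)) :
    PySem.Chars.splitlines.go isB [] cur acc =
      if cur.isEmpty then acc.reverse else (cur.reverse :: acc).reverse := rfl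

theorem pv_go_cons (isB : Char → Bool) (c : Char) (rest cur : List Char) (acc : List (List Char))
    (hc : c ≠ '\r') :
    PySem.Chars.splitlines.go isB (c :: rest) cur acc =
      if isB c then PySem.Chars.splitlines.go isB rest [] (cur.reverse :: acc)
      else PySem.Chars.splitlines.go isB rest (c :: cur) acc := by
  cases rest with
  | nil => simp [PySem.Chars.splitlines.go]
  | cons d rest' =>
    by_cases hd : d = '\n'
    · subst hd; rw [PySem.Chars.splitlines.go]; simp [hc]
    · rw [PySem.Chars.splitlines.go]; simp [hc, hd]

-- every line produced by splitlines consists of non-break characters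
theorem pv_go_no_break (isB : Char → Bool) (s cur : List Char) (acc : List (List Char)) :
    (∀ l ∈ acc, l.all (fun c => !isB c) = true) →
    cur.all (fun c => !isB c) = true →
    ∀ l ∈ PySem.Chars.splitlines.go isB s cur acc, l.all (fun c => !isB c) = true := by
  fun_induction PySem.Chars.splitlines.go isB s cur acc with
  | case1 cur acc h =>
    intro hacc _ l hl
    exact hacc l (by simpa using hl)
  | case2 cur acc h =>
    intro hacc hcur l hl
    simp only [List.mem_reverse, List.mem_cons] at hl
    rcases hl with hl | hl
    · subst hl; simpa using hcur
    · exact hacc l hl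
  | case3 rest cur acc ih =>
    intro hacc hcur
    refine ih ?_ (by simp)
    intro l hl
    rcases List.mem_cons.mp hl with hl | hl
    · subst hl; simpa using hcur
    · exact hacc l hl
  | case4 c rest cur acc hne hc ih =>
    intro hacc hcur
    refine ih ?_ (by simp)
    intro l hl
    rcases List.mem_cons.mp hl with hl | hl
    · subst hl; simpa using hcur
    · exact hacc l hl
  | case5 c rest cur acc hne hc ih =>
    intro hacc hcur
    refine ih ?_ ?_
    · exact fun l hl => hacc l hl
    · simp only [List.all_cons, hcur, Bool.and_true]
      simpa using hc

theorem pv_lines_no_break (s : String) :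
    ∀ l ∈ PySem.Str.splitlines s, l.toList.all (fun c => !pvIsB c) = true := by
  intro l hl
  simp only [PySem.Str.splitlines, List.mem_map] at hl
  obtain ⟨cs, hcs, rfl⟩ := hl
  rw [pv_splitlines_eq] at hcs
  have := pv_go_no_break pvIsB s.toList [] [] (by simp) (by simp) cs hcs
  simpa using this

-- consuming a break-free chunk of the input
theorem pv_go_append (isB : Char → Bool) (l rest cur : List Char) (acc : List (List Char))
    (h : ∀ c ∈ l, isB c = false ∧ c ≠ '\r') :
    PySem.Chars.splitlines.go isB (l ++ rest) cur acc =
      PySem.Chars.splitlines.go isB rest (l.reverse ++ cur) acc := by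
  induction l generalizing cur with
  | nil => simp
  | cons c l ih =>
    have hc := h c (by simp)
    rw [List.cons_append, pv_go_cons isB c _ _ _ hc.2, if_neg (by simp [hc.1]),
        ih _ (fun d hd => h d (by simp [hd]))]
    simp

-- drop a single trailing empty line (what splitlines ∘ "\n".join loses)
def pvTrimC : List (List Char) → List (List Char)
  | [] => []
  | [l] => if l.isEmpty then [] else [l]
  | l :: l' :: ls => l :: pvTrimC (l' :: ls)

def pvTrim : List String → List String
  | [] => []
  | [l] => if l = "" then [] else [l]
  | l :: l' :: ls => l :: pvTrim (l' :: ls)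

theorem pv_go_intercalate (ls : List (List Char)) (acc : List (List Char))
    (h : ∀ l ∈ ls, ∀ c ∈ l, pvIsB c = false ∧ c ≠ '\r') :
    PySem.Chars.splitlines.go pvIsB (List.intercalate ['\n'] ls) [] acc =
      acc.reverse ++ pvTrimC ls := by
  induction ls generalizing acc with
  | nil => simp [List.intercalate, pv_go_nil, pvTrimC]
  | cons l ls ih =>
    cases ls with
    | nil =>
      have hint : List.intercalate ['\n'] [l] = l ++ [] := by simp [List.intercalate]
      rw [hint, pv_go_append pvIsB l [] [] acc (h l (by simp)), pv_go_nil]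
      by_cases he : l.isEmpty
      · simp [pvTrimC, List.isEmpty_iff.mp he]
      · simp [pvTrimC, he]
    | cons l2 ls' =>
      have hint : List.intercalate ['\n'] (l :: l2 :: ls') =
          l ++ '\n' :: List.intercalate ['\n'] (l2 :: ls') := by
        simp [List.intercalate, List.intersperse]
      rw [hint, pv_go_append pvIsB l _ [] acc (h l (by simp)),
          pv_go_cons pvIsB '\n' _ _ _ (by decide), if_pos (by decide)]
      have := ih (l :: acc) (fun x hx => h x (by simp [hx]))
      simp only [List.append_nil, List.reverse_reverse] at this ⊢
      rw [this]
      simp [pvTrimC]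

theorem pv_trimC_map (blk : List String) :
    (pvTrimC (blk.map String.toList)).map String.ofList = pvTrim blk := by
  induction blk with
  | nil => simp [pvTrimC, pvTrim]
  | cons l ls ih =>
    cases ls with
    | nil =>
      by_cases hl : l = ""
      · subst hl; simp [pvTrimC, pvTrim]
      · have hne : ¬ l.toList.isEmpty = true := by
          intro he
          apply hl
          have h3 := congrArg String.ofList (List.isEmpty_iff.mp he)
          simpa using h3
        simp [pvTrimC, pvTrim, hl, hne]
    | cons l2 ls' =>
      simp only [List.map_cons, pvTrimC, pvTrim, List.map]
      rw [show (l2.toList :: ls'.map String.toList) = (l2 :: ls').map String.toList by simp]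
      rw [ih]
      simp

theorem pv_splitlines_join (blk : List String)
    (h : ∀ l ∈ blk, l.toList.all (fun c => !pvIsB c) = true) :
    PySem.Str.splitlines (PySem.Str.join "\n" blk) = pvTrim blk := by
  have hch : ∀ l ∈ blk.map String.toList, ∀ c ∈ l, pvIsB c = false ∧ c ≠ '\r' := by
    intro l hl c hc
    obtain ⟨x, hx, rfl⟩ := List.mem_map.mp hl
    have hb : pvIsB c = false := by
      have := h x hx
      simpa using (List.all_eq_true.mp this c hc)
    refine ⟨hb, ?_⟩
    intro hcr
    subst hcr
    exact absurd hb (by decide)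
  rw [PySem.Str.splitlines, PySem.Str.join]
  have : (String.ofList (PySem.Chars.join "\n".toList (blk.map String.toList))).toList
      = PySem.Chars.join "\n".toList (blk.map String.toList) := by simp
  rw [this]
  rw [show PySem.Chars.join "\n".toList (blk.map String.toList)
        = List.intercalate ['\n'] (blk.map String.toList) from rfl]
  rw [pv_splitlines_eq, pv_go_intercalate _ [] hch]
  simpa using pv_trimC_map blk

-- a "" line never changes the block-parse state
theorem pv_blockStepA_empty (st : Option String × List String × List String) :
    pvBlockStepA st "" = st := by
  simp [pvBlockStepA, PySem.Str.startswith, PySem.Chars.startswith]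

theorem pv_parse_trim (blk : List String) (st : Option String × List String × List String) :
    (pvTrim blk).foldl pvBlockStepA st = blk.foldl pvBlockStepA st := by
  induction blk generalizing st with
  | nil => rfl
  | cons l ls ih =>
    cases ls with
    | nil =>
      by_cases hl : l = ""
      · simp [pvTrim, hl, pv_blockStepA_empty]
      · simp [pvTrim, hl]
    | cons l' ls' => simp [pvTrim, List.foldl_cons, ih]

theorem pv_ne_empty (fp x : String) (_hfp : fp ≠ "") : fp ++ "\n" ++ x ≠ "" := by
  intro he
  have := congrArg String.toList he
  simp at this

-- A's per-block chunk accumulation equals B's flush of the directly-parsed block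
theorem pv_flush_chunk (blk : List String)
    (h : ∀ l ∈ blk, l.toList.all (fun c => !pvIsB c) = true) (rc ac : List String) :
    pvChunkStepA (rc, ac) blk =
      pvFlushB (blk.foldl pvBlockStepA (none, [], [])).1
        (blk.foldl pvBlockStepA (none, [], [])).2.1
        (blk.foldl pvBlockStepA (none, [], [])).2.2 rc ac := by
  rw [pvChunkStepA]
  rw [show pvBuildBlockA (PySem.Str.join "\n" blk)
        = (let lines := PySem.Str.splitlines (PySem.Str.join "\n" blk);
           let st := lines.foldl pvBlockStepA (none, [], []);
           match st.1 with
           | none => ("", "")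
           | some fp =>
             if fp = "" then ("", "")
             else if st.2.1.isEmpty && st.2.2.isEmpty then ("", "")
             else (if st.2.1.isEmpty then "" else fp ++ "\n" ++ PySem.Str.join "\n" st.2.1,
                   if st.2.2.isEmpty then "" else fp ++ "\n" ++ PySem.Str.join "\n" st.2.2)) from rfl]
  simp only [pv_splitlines_join blk h, pv_parse_trim]
  rcases hst : blk.foldl pvBlockStepA (none, [], []) with ⟨fp?, rem, add⟩
  cases fp? with
  | none => simp [pvFlushB]
  | some fp =>
    by_cases hfp : fp = ""
    · simp [pvFlushB, hfp]
    · by_cases hrem : rem.isEmpty <;> by_cases hadd : add.isEmpty <;>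
        simp [pvFlushB, hfp, hrem, hadd, pv_ne_empty fp _ hfp]

-- the blocks accumulator of A's split loop factors out
theorem pv_splitA_prefix (lines : List String) (bs : List (List String)) (cur : List String) :
    lines.foldl pvSplitStepA (bs, cur) =
      (bs ++ (lines.foldl pvSplitStepA ([], cur)).1, (lines.foldl pvSplitStepA ([], cur)).2) := by
  induction lines generalizing bs cur with
  | nil => simp
  | cons l ls ih =>
    by_cases hd : PySem.Str.startswith l "diff "
    · by_cases hc : cur.isEmpty
      · rw [List.foldl_cons, List.foldl_cons]
        have e1 : pvSplitStepA (bs, cur) l = (bs, [l]) := by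
          unfold pvSplitStepA; rw [if_pos hd]; simp [hc]
        have e2 : pvSplitStepA ([], cur) l = ([], [l]) := by
          unfold pvSplitStepA; rw [if_pos hd]; simp [hc]
        rw [e1, e2, ih bs [l]]
      · rw [List.foldl_cons, List.foldl_cons]
        have e1 : pvSplitStepA (bs, cur) l = (bs ++ [cur], [l]) := by
          unfold pvSplitStepA; rw [if_pos hd]; simp [hc]
        have e2 : pvSplitStepA ([], cur) l = ([cur], [l]) := by
          unfold pvSplitStepA; rw [if_pos hd]; simp [hc]
        rw [e1, e2, ih (bs ++ [cur]) [l], ih [cur] [l]]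
        simp
    · rw [List.foldl_cons, List.foldl_cons]
      have e1 : pvSplitStepA (bs, cur) l = (bs, cur ++ [l]) := by
        by_cases hc : cur.isEmpty
        · have : cur = [] := by simpa using hc
          subst this; unfold pvSplitStepA; rw [if_neg hd]; simp
        · unfold pvSplitStepA; rw [if_neg hd]; simp [hc]
      have e2 : pvSplitStepA ([], cur) l = ([], cur ++ [l]) := by
        by_cases hc : cur.isEmpty
        · have : cur = [] := by simpa using hc
          subst this; unfold pvSplitStepA; rw [if_neg hd]; simp
        · unfold pvSplitStepA; rw [if_neg hd]; simp [hc]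
      rw [e1, e2, ih bs (cur ++ [l])]

def pvFin (r : List (List String) × List String) : List (List String) :=
  if r.2.isEmpty then r.1 else r.1 ++ [r.2]

theorem pv_fin_append (bs : List (List String)) (r : List (List String) × List String) :
    pvFin (bs ++ r.1, r.2) = bs ++ pvFin r := by
  by_cases h : r.2.isEmpty <;> simp [pvFin, h]

-- a "diff " line matches none of the block-parse prefixes
theorem pv_diff_line_inert (line : String) (hd : PySem.Str.startswith line "diff " = true)
    (st : Option String × List String × List String) : pvBlockStepA st line = st := by
  have hpre : "diff ".toList <+: line.toList := by
    have := hd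
    simp only [PySem.Str.startswith_eq] at this
    exact (PySem.Chars.startswith_iff _ _).mp this
  obtain ⟨t, ht⟩ := hpre
  have ht' : line.toList = 'd' :: 'i' :: 'f' :: 'f' :: ' ' :: t := by
    rw [← ht]; rfl
  have h1 : PySem.Chars.startswith line.toList ['+', '+', '+', ' ', 'b', '/'] = false := by
    simp [PySem.Chars.startswith, ht', List.isPrefixOf]
  have h2 : PySem.Chars.startswith line.toList ['-', '-', '-', ' ', 'a', '/'] = false := by
    simp [PySem.Chars.startswith, ht', List.isPrefixOf]
  have h3 : PySem.Chars.startswith line.toList ['-'] = false := by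
    simp [PySem.Chars.startswith, ht', List.isPrefixOf]
  have h4 : PySem.Chars.startswith line.toList ['+'] = false := by
    simp [PySem.Chars.startswith, ht', List.isPrefixOf]
  simp [pvBlockStepA, h1, h2, h3, h4]

theorem pv_stepB_nondiff (p : List String × List String)
    (st : Option String × List String × List String) (line : String)
    (hd : PySem.Str.startswith line "diff " = false) :
    pvStepB (p, st) line = (p, pvBlockStepA st line) := by
  have hd' : PySem.Chars.startswith line.toList ['d', 'i', 'f', 'f', ' '] = false := by
    simpa using hd
  by_cases h1 : PySem.Chars.startswith line.toList ['+', '+', '+', ' ', 'b', '/'] <;>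
    by_cases h2 : PySem.Chars.startswith line.toList ['-', '-', '-', ' ', 'a', '/'] <;>
      (simp [pvStepB, pvBlockStepA, hd', h1, h2]; try (split_ifs <;> rfl))

theorem pv_stepB_diff (p : List String × List String)
    (st : Option String × List String × List String) (line : String)
    (hd : PySem.Str.startswith line "diff " = true) :
    pvStepB (p, st) line = (pvFlushB st.1 st.2.1 st.2.2 p.1 p.2, none, [], []) := by
  rw [pvStepB, if_pos hd]

-- the main invariant: B's single pass equals A's block pipeline
theorem pv_key (lines : List String)
    (h : ∀ l ∈ lines, l.toList.all (fun c => !pvIsB c) = true)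
    (cur : List String) (hc : ∀ l ∈ cur, l.toList.all (fun c => !pvIsB c) = true)
    (rc ac : List String) :
    (fun st => pvFlushB st.2.1 st.2.2.1 st.2.2.2 st.1.1 st.1.2)
      (lines.foldl pvStepB ((rc, ac), cur.foldl pvBlockStepA (none, [], []))) =
      (pvFin (lines.foldl pvSplitStepA ([], cur))).foldl pvChunkStepA (rc, ac) := by
  induction lines generalizing cur rc ac with
  | nil =>
    simp only [List.foldl_nil]
    by_cases hcur : cur.isEmpty
    · have : cur = [] := by simpa using hcur
      subst this
      simp [pvFin, pvFlushB]
    · rw [show pvFin ([], cur) = [cur] by simp [pvFin, hcur]]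
      rw [List.foldl_cons, List.foldl_nil, pv_flush_chunk cur hc rc ac]
  | cons l ls ih =>
    have hl := h l (by simp)
    have hls : ∀ x ∈ ls, x.toList.all (fun c => !pvIsB c) = true := fun x hx => h x (by simp [hx])
    by_cases hd : PySem.Str.startswith l "diff "
    · -- B flushes; A closes the current block
      rw [List.foldl_cons, pv_stepB_diff _ _ _ hd]
      have hparse : ([l] : List String).foldl pvBlockStepA (none, [], []) = (none, [], []) := by
        simp [pv_diff_line_inert l hd]
      set F := pvFlushB (cur.foldl pvBlockStepA (none, [], [])).1
        (cur.foldl pvBlockStepA (none, [], [])).2.1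
        (cur.foldl pvBlockStepA (none, [], [])).2.2 rc ac with hF
      rw [show ((F, none, [], [])
            : (List String × List String) × Option String × List String × List String)
          = ((F.1, F.2), ([l] : List String).foldl pvBlockStepA (none, [], [])) by rw [hparse]]
      rw [ih hls [l] (by intro x hx; simp at hx; subst hx; exact hl) F.1 F.2]
      -- now rewrite A's side
      rw [List.foldl_cons]
      have eA : pvSplitStepA ([], cur) l =
          ((if cur.isEmpty then [] else [cur]), [l]) := by
        unfold pvSplitStepA; rw [if_pos hd]; rfl
      rw [eA, pv_splitA_prefix ls (if cur.isEmpty then [] else [cur]) [l], pv_fin_append,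
          List.foldl_append]
      congr 1
      by_cases hcur : cur.isEmpty
      · have : cur = [] := by simpa using hcur
        subst this
        simp [hF, pvFlushB]
      · rw [if_neg hcur, List.foldl_cons, List.foldl_nil, pv_flush_chunk cur hc rc ac, hF]
    · rw [List.foldl_cons, pv_stepB_nondiff _ _ _ (by simpa using hd)]
      rw [show pvBlockStepA (cur.foldl pvBlockStepA (none, [], [])) l
            = (cur ++ [l]).foldl pvBlockStepA (none, [], []) by rw [List.foldl_append]; rfl]
      rw [ih hls (cur ++ [l]) (by
        intro x hx
        rcases List.mem_append.mp hx with hx | hx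
        · exact hc x hx
        · simp at hx; subst hx; exact hl) rc ac]
      congr 2
      rw [List.foldl_cons]
      congr 1
      by_cases hcur : cur.isEmpty
      · have : cur = [] := by simpa using hcur
        subst this; unfold pvSplitStepA; rw [if_neg hd]; simp
      · unfold pvSplitStepA; rw [if_neg hd]; simp [hcur]

theorem pv_join_nil (sep : String) : PySem.Str.join sep [] = "" := rfl

-- ===== VERDICT (by name: the statement is the Claim_ definition above) =====
theorem build_remove_add_from_diff_spec : Claim_equal_build_remove_add_from_diff := by
  intro diff_text _
  unfold Spec_build_remove_add_from_diff
  by_cases hemp : diff_text = ""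
  · simp [build_remove_add_from_diff, build_remove_add_from_diff_alt, hemp]
  · have hkey := pv_key (PySem.Str.splitlines diff_text) (pv_lines_no_break diff_text)
      [] (by simp) [] []
    simp only [List.foldl_nil] at hkey
    simp only [build_remove_add_from_diff, build_remove_add_from_diff_alt, split_diff_blocks,
      if_neg hemp]
    rw [show (if ((PySem.Str.splitlines diff_text).foldl pvSplitStepA ([], [])).2.isEmpty
             then ((PySem.Str.splitlines diff_text).foldl pvSplitStepA ([], [])).1
             else ((PySem.Str.splitlines diff_text).foldl pvSplitStepA ([], [])).1
                  ++ [((PySem.Str.splitlines diff_text).foldl pvSplitStepA ([], [])).2])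
          = pvFin ((PySem.Str.splitlines diff_text).foldl pvSplitStepA ([], [])) from rfl]
    rw [← hkey]
    rcases hr : pvFlushB
        ((PySem.Str.splitlines diff_text).foldl pvStepB (([], []), none, [], [])).2.1
        ((PySem.Str.splitlines diff_text).foldl pvStepB (([], []), none, [], [])).2.2.1
        ((PySem.Str.splitlines diff_text).foldl pvStepB (([], []), none, [], [])).2.2.2
        ((PySem.Str.splitlines diff_text).foldl pvStepB (([], []), none, [], [])).1.1
        ((PySem.Str.splitlines diff_text).foldl pvStepB (([], []), none, [], [])).1.2
      with ⟨rcs, acs⟩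
    by_cases h1 : rcs.isEmpty <;> by_cases h2 : acs.isEmpty <;>
      simp_all [pv_join_nil, List.isEmpty_iff]
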